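-- pv_equiv track=rewrite | github.com/J-Nokwal/Data_Structure_py | 39893677.py | bc_kuchh_bhi
-- ===== SOURCE A (Python) =====
-- def bc_kuchh_bhi(x, l):
--     bc= True
--     for i in l:
--         if x<=i:
--             bc= False
--             return False
--     if sorted(l)==l:
--         return True
--     return False
-- ===== SOURCE B (Python) =====
-- def bc_kuchh_bhi(x, l):
--     # linear scan: every element below x, and adjacent pairs nondecreasing
--     return all(a < x for a in l) and all(a <= b for a, b in zip(l, l[1:]))
-- ===== Notes on version B (the rewrite author's own statement) =====
-- stated objective: alternative
-- what changed: Replaced the loop-plus-sorted(l)==l comparison by a single linear scan: every element below x and adjacent pairs nondecreasing; trades the sort-and-compare for an adjacency check.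
import Mathlib
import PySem

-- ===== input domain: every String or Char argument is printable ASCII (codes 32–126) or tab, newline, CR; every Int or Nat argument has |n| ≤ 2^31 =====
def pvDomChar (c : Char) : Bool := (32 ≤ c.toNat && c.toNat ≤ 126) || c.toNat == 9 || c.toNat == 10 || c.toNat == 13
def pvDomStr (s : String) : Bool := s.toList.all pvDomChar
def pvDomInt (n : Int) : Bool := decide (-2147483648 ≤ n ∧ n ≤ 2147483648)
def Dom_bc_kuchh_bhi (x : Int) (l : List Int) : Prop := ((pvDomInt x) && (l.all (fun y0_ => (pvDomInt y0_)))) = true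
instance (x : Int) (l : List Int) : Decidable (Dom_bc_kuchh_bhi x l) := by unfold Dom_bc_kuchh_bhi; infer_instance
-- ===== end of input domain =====

-- B replaces A's sorted(l)==l comparison by a one-pass adjacency check (objective: alternative algorithm).

-- ===== PORT A =====
-- the 'for i in l' loop with its early 'return False'; true = loop fell through
def bcLoopA (x : Int) : List Int → Bool
  | [] => true
  | i :: t => if x ≤ i then false else bcLoopA x t

def bc_kuchh_bhi (x : Int) (l : List Int) : Bool :=
  if bcLoopA x l = false then false
  else if PySem.List.sorted l (fun y => y) false = l then true
  else false

-- ===== PORT B =====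
def bc_kuchh_bhi_alt (x : Int) (l : List Int) : Bool :=
  (l.all (fun a => decide (a < x))) &&
  ((l.zip (PySem.List.slice l (some 1) none)).all (fun p => decide (p.1 ≤ p.2)))

-- ===== PRECONDITION & SPEC =====
def Spec_bc_kuchh_bhi (x : Int) (l : List Int) (out : Bool) : Prop := out = bc_kuchh_bhi_alt x l
instance (x : Int) (l : List Int) (out : Bool) : Decidable (Spec_bc_kuchh_bhi x l out) := by unfold Spec_bc_kuchh_bhi; infer_instance

-- ===== CLAIM (what is proved, stated in full; the proofs are below) =====
def Claim_equal_bc_kuchh_bhi : Prop := ∀ (x : Int) (l : List Int), Dom_bc_kuchh_bhi x l → Spec_bc_kuchh_bhi x l (bc_kuchh_bhi x l)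

-- ===== LEMMAS AND PROOFS =====

lemma bcLoopA_eq_all (x : Int) (l : List Int) :
    bcLoopA x l = l.all (fun a => decide (a < x)) := by
  induction l with
  | nil => rfl
  | cons i t ih =>
    simp only [bcLoopA, List.all_cons, ih]
    by_cases h : x ≤ i
    · simp [h, not_lt.mpr h]
    · simp [h, lt_of_not_ge h]

lemma slice_one_eq_tail (l : List Int) : PySem.List.slice l (some 1) none = l.tail :=
  PySem.List.slice_from_one l

lemma zip_tail_all_iff_chain' (l : List Int) :
    ((l.zip l.tail).all (fun p => decide (p.1 ≤ p.2)) = true) ↔ l.IsChain (· ≤ ·) := by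
  induction l with
  | nil => simp
  | cons a t ih =>
    cases t with
    | nil => simp
    | cons b u =>
      simp only [List.tail_cons, List.zip_cons_cons, List.all_cons, Bool.and_eq_true,
        decide_eq_true_eq, List.isChain_cons_cons]
      constructor
      · rintro ⟨h1, h2⟩; exact ⟨h1, (ih).1 h2⟩
      · rintro ⟨h1, h2⟩; exact ⟨h1, (ih).2 h2⟩

lemma sorted_eq_self_iff_pairwise (l : List Int) :
    PySem.List.sorted l (fun y => y) false = l ↔ l.Pairwise (· ≤ ·) := by
  constructor
  · intro h
    have := PySem.List.sorted_pairwise (xs := l) (key := fun y => y)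
    rw [h] at this
    exact this
  · intro h
    exact PySem.List.sorted_eq_self_of_pairwise l (fun y => y) h

-- ===== VERDICT (by name: the statement is the Claim_ definition above) =====
theorem bc_kuchh_bhi_spec : Claim_equal_bc_kuchh_bhi := by
  intro x l _
  unfold Spec_bc_kuchh_bhi bc_kuchh_bhi bc_kuchh_bhi_alt
  rw [bcLoopA_eq_all, slice_one_eq_tail]
  by_cases hall : l.all (fun a => decide (a < x)) = true
  · simp only [hall, Bool.true_and]
    by_cases hs : PySem.List.sorted l (fun y => y) false = l
    · have hp := (sorted_eq_self_iff_pairwise l).mp hs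
      have hc : l.IsChain (· ≤ ·) := hp.isChain
      simp [hs, (zip_tail_all_iff_chain' l).mpr hc]
    · have hc : ¬ l.IsChain (· ≤ ·) := by
        intro hc
        exact hs ((sorted_eq_self_iff_pairwise l).mpr (List.isChain_iff_pairwise.mp hc))
      have : ¬ ((l.zip l.tail).all (fun p => decide (p.1 ≤ p.2)) = true) := by
        intro h; exact hc ((zip_tail_all_iff_chain' l).mp h)
      simp [hs, this]
  · simp [Bool.eq_false_iff.mpr hall]
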